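-- pv_equiv track=rewrite | github.com/sfa119f/tugas4-kriptografi | function.py | makeBlockMessage
-- ===== SOURCE A (Python) =====
-- def makeBlockMessage(lenVal, text):
-- # Membuat block message dari text dengan panjang lenVal
--   if len(text) % (lenVal // 2) != 0:
--     text += 'X' * ((lenVal // 2) - (len(text) % (lenVal // 2)))
--
--   res = []
--   for i in range(0, len(text), (lenVal // 2)):
--     if lenVal == 1:
--       res.append(ord(text[i]) - ord('A') // 10)
--       res.append(ord(text[i]) - ord('A') % 10)
--     else:
--       blockDigit = 0
--       for j in range(i, i + (lenVal // 2)):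
--         blockDigit = blockDigit * 100 + (ord(text[j]) - ord('A'))
--       res.append(blockDigit)
--
--   return res
-- ===== SOURCE B (Python) =====
-- def makeBlockMessage(lenVal, text):
--     # One flat pass with an accumulator and a counter instead of nested index loops;
--     # the unreachable lenVal == 1 branch of the original is dropped.
--     size = lenVal // 2
--     if len(text) % size != 0:
--         text += 'X' * (size - len(text) % size)
--     res = []
--     acc = 0
--     count = 0
--     for c in text:
--         acc = acc * 100 + (ord(c) - ord('A'))
--         count += 1
--         if count == size:
--             res.append(acc)
--             acc = 0
--             count = 0
--     return res
-- ===== Notes on version B (the rewrite author's own statement) =====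
-- stated objective: simpler
-- what changed: Replaced the nested index loops (outer stride range plus inner per-block range with repeated indexing) by a single flat character pass maintaining an accumulator and a counter that flushes a block every size characters, and dropped the unreachable lenVal==1 branch.
import Mathlib
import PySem

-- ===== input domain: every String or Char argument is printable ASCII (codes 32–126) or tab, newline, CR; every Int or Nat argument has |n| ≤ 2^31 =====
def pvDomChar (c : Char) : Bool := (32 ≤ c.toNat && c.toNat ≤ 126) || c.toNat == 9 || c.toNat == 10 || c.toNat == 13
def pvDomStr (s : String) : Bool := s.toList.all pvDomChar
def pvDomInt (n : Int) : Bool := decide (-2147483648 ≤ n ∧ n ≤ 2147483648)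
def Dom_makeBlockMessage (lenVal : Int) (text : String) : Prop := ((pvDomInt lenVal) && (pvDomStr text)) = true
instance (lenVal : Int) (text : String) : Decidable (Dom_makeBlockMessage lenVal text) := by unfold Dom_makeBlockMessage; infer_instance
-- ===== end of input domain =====

-- B replaces A's nested index loops by one flat character pass with an accumulator and a
-- counter flushed every block width (objective: simpler); A's unreachable lenVal == 1 branch is dropped.

-- Both Pythons share the identical first three padding lines; ported once.
def pvPad (s : Int) (tl : List Char) : List Char :=
  if PySem.Int.mod (tl.length : Int) s ≠ 0 then
    tl ++ List.replicate (s - PySem.Int.mod (tl.length : Int) s).toNat 'X'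
  else tl

-- ===== PORT A =====
-- ord(text[j]): Python would raise IndexError out of range; under Pre_ every access is in
-- range, so the .getD 'A' default is never consulted.
def pvOrdAt (t : List Char) (j : Int) : Int := ((PySem.List.pyGetD t j 'A').toNat : Int)

def makeBlockMessage (lenVal : Int) (text : String) : List Int :=
  let s := PySem.Int.floordiv lenVal 2
  let t := pvPad s text.toList
  (PySem.List.pyRange 0 (t.length : Int) s).foldl
    (fun res i =>
      if lenVal = 1 then
        -- ord('A') // 10 = 6, ord('A') % 10 = 5
        (res ++ [pvOrdAt t i - 6]) ++ [pvOrdAt t i - 5]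
      else
        res ++ [(PySem.List.pyRange i (i + s) 1).foldl
                  (fun bd j => bd * 100 + (pvOrdAt t j - 65)) 0])
    []

-- ===== PORT B =====
-- loop body of B: update accumulator and counter, flush a block when the counter reaches s
def pvBStep (s : Int) (st : List Int × Int × Int) (c : Char) : List Int × Int × Int :=
  let acc := st.2.1 * 100 + ((c.toNat : Int) - 65)
  let count := st.2.2 + 1
  if count = s then (st.1 ++ [acc], 0, 0) else (st.1, acc, count)

def makeBlockMessage_alt (lenVal : Int) (text : String) : List Int :=
  let s := PySem.Int.floordiv lenVal 2
  let t := pvPad s text.toList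
  (t.foldl (pvBStep s) ([], 0, 0)).1

-- ===== PRECONDITION & SPEC =====
-- Pre_ excludes exactly lenVal ∈ {0, 1} (where lenVal // 2 = 0): there Python A raises
-- ZeroDivisionError at the modulo (and so does B).
def Pre_makeBlockMessage (lenVal : Int) (text : String) : Prop :=
  PySem.Int.floordiv lenVal 2 ≠ 0
instance (lenVal : Int) (text : String) : Decidable (Pre_makeBlockMessage lenVal text) := by
  unfold Pre_makeBlockMessage; infer_instance

def pvWitness_makeBlockMessage : Int × String := (4, "HELLO")

def Spec_makeBlockMessage (lenVal : Int) (text : String) (out : List Int) : Prop := out = makeBlockMessage_alt lenVal text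
instance (lenVal : Int) (text : String) (out : List Int) : Decidable (Spec_makeBlockMessage lenVal text out) := by unfold Spec_makeBlockMessage; infer_instance

-- ===== CLAIM (what is proved, stated in full; the proofs are below) =====
def Claim_equal_makeBlockMessage : Prop := ∀ (lenVal : Int) (text : String), Dom_makeBlockMessage lenVal text → Pre_makeBlockMessage lenVal text → Spec_makeBlockMessage lenVal text (makeBlockMessage lenVal text)

-- ===== LEMMAS AND PROOFS =====

-- Horner accumulation of one chunk of characters.
def pvHor (acc : Int) (cs : List Char) : Int :=
  cs.foldl (fun a c => a * 100 + ((c.toNat : Int) - 65)) acc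

-- k blocks of width s, front-recursive: the common characterisation of both results.
def pvBlocksK (s : Nat) : Nat → List Char → List Int
  | 0, _ => []
  | k+1, t => pvHor 0 (t.take s) :: pvBlocksK s k (t.drop s)

theorem pvB_neg (s : Int) (hs : s < 0) :
    ∀ (cs : List Char) (res : List Int) (acc count : Int), 0 ≤ count →
      (cs.foldl (pvBStep s) (res, acc, count)).1 = res := by
  intro cs
  induction cs with
  | nil => intro res acc count _; rfl
  | cons c cs ih =>
      intro res acc count hc
      have hne : count + 1 ≠ s := by omega
      simp only [List.foldl_cons, pvBStep, if_neg hne]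
      exact ih res _ (count + 1) (by omega)

theorem pvB_chunk (s : Int) :
    ∀ (cs : List Char) (res : List Int) (acc count : Int),
      0 ≤ count → count < s → count + (cs.length : Int) = s →
      cs.foldl (pvBStep s) (res, acc, count) = (res ++ [pvHor acc cs], 0, 0) := by
  intro cs
  induction cs with
  | nil =>
      intro res acc count h0 hlt hlen
      exfalso
      simp only [List.length_nil, Nat.cast_zero, add_zero] at hlen
      omega
  | cons c cs ih =>
      intro res acc count h0 hlt hlen
      have hlen' : count + ((cs.length : Int) + 1) = s := by
        simp only [List.length_cons] at hlen; omega
      simp only [List.foldl_cons, pvBStep]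
      by_cases h : count + 1 = s
      · have hnil : cs = [] := by
          have h0' : cs.length = 0 := by omega
          simpa using h0'
        subst hnil
        simp [h, pvHor]
      · rw [if_neg h]
        rw [ih _ _ (count + 1) (by omega) (by omega) (by omega)]
        simp [pvHor]

theorem pvB_go (s : Int) (hs : 0 < s) :
    ∀ (k : Nat) (t : List Char) (res : List Int), t.length = s.toNat * k →
      t.foldl (pvBStep s) (res, 0, 0) = (res ++ pvBlocksK s.toNat k t, 0, 0) := by
  intro k
  induction k with
  | zero =>
      intro t res hlen
      have : t = [] := by simpa using hlen
      subst this; simp [pvBlocksK]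
  | succ k ih =>
      intro t res hlen
      have hsN : 0 < s.toNat := by omega
      have hlen' : s.toNat ≤ t.length := by
        rw [hlen]; exact Nat.le_mul_of_pos_right _ (Nat.succ_pos k)
      have hsplit : t = t.take s.toNat ++ t.drop s.toNat := (List.take_append_drop _ t).symm
      conv_lhs => rw [hsplit]
      rw [List.foldl_append]
      rw [pvB_chunk s (t.take s.toNat) res 0 0 le_rfl hs
           (by simp [List.length_take, Nat.min_eq_left hlen']; omega)]
      rw [ih (t.drop s.toNat) _ (by simp [List.length_drop, hlen]; ring_nf; omega)]
      simp [pvBlocksK]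

-- A's inner loop over range(i, i + s) is the Horner value of the chunk at i.
theorem pvA_inner (s : Int) (hs : 0 < s) (t : List Char) (i : Int)
    (hi : 0 ≤ i) (hend : i + s ≤ (t.length : Int)) :
    (PySem.List.pyRange i (i + s) 1).foldl (fun bd j => bd * 100 + (pvOrdAt t j - 65)) 0
      = pvHor 0 ((t.drop i.toNat).take s.toNat) := by
  have hM : (((t.take (i + s).toNat).length : Nat) : Int) = i + s := by
    simp [List.length_take]
    omega
  have h2 := PySem.List.foldl_pyRange_pyGetD' (t.take (i + s).toNat) 'A'
      (fun a (c : Char) => a * 100 + ((c.toNat : Int) - 65)) 0 hi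
  rw [hM] at h2
  have h3 : (PySem.List.pyRange i (i + s) 1).foldl (fun bd j => bd * 100 + (pvOrdAt t j - 65)) 0
      = (PySem.List.pyRange i (i + s) 1).foldl
          (fun acc j => (fun a (c : Char) => a * 100 + ((c.toNat : Int) - 65)) acc
            (PySem.List.pyGetD (t.take (i + s).toNat) j 'A')) 0 := by
    apply PySem.List.foldl_congr_mem
    intro acc j hj
    rw [PySem.List.mem_pyRange_one] at hj
    have hj1 : 0 ≤ j := le_trans hi hj.1
    have hjlen : j < (t.length : Int) := lt_of_lt_of_le hj.2 hend
    have hjM : j < (((t.take (i + s).toNat).length : Nat) : Int) := by rw [hM]; exact hj.2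
    simp only []
    rw [PySem.List.pyGetD_eq_getElem _ _ hj1 hjM]
    unfold pvOrdAt
    rw [PySem.List.pyGetD_eq_getElem _ _ hj1 hjlen]
    simp [List.getElem_take]
  rw [h3, h2, List.drop_take]
  have hnat : (i + s).toNat - i.toNat = s.toNat := by omega
  rw [hnat]
  rfl

-- The per-index description of A's result equals the chunked description.
theorem pvMap_blocks (sN : Nat) :
    ∀ (k : Nat) (t : List Char),
      (List.range k).map (fun j => pvHor 0 ((t.drop (sN * j)).take sN)) = pvBlocksK sN k t := by
  intro k
  induction k with
  | zero => intro t; simp [pvBlocksK]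
  | succ k ih =>
      intro t
      have hstep : (fun (j : Nat) => pvHor 0 ((t.drop (sN * j)).take sN)) ∘ Nat.succ
          = fun (j : Nat) => pvHor 0 (((t.drop sN).drop (sN * j)).take sN) := by
        funext j
        simp only [Function.comp_apply, Nat.succ_eq_add_one, List.drop_drop]
        have harith : sN * (j + 1) = sN + sN * j := by ring
        rw [harith]
      rw [List.range_succ_eq_map, List.map_cons, List.map_map, hstep, ih, pvBlocksK]
      simp

-- step-s range over [0, s*k) as a mapped Nat range
theorem pvRange_step (s : Int) (hs : 0 < s) (k : Nat) :
    PySem.List.pyRange 0 (s * k) s = (List.range k).map (fun (j : Nat) => s * (j : Int)) := by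
  rw [PySem.List.pyRange_of_pos _ _ hs]
  rcases Nat.eq_zero_or_pos k with hk | hk
  · subst hk; simp
  · have hpos : (0 : Int) < s * k := by positivity
    rw [if_pos hpos]
    have harith : (s * (k : Int) - 0 + s - 1) / s = (k : Int) := by
      have h1 : s * (k : Int) - 0 + s - 1 = (s - 1) + (k : Int) * s := by ring
      rw [h1, Int.add_mul_ediv_right _ _ (by omega : s ≠ 0),
          Int.ediv_eq_zero_of_lt (by omega) (by omega)]
      ring
    rw [harith, Int.toNat_natCast]
    apply List.map_congr_left
    intro j _
    ring

-- A's outer fold appends one block per index: it is a map.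
theorem pvA_fold (t : List Char) (s : Int) :
    ∀ (l : List Int) (acc : List Int),
      l.foldl (fun res i => res ++ [(PySem.List.pyRange i (i + s) 1).foldl
          (fun bd j => bd * 100 + (pvOrdAt t j - 65)) 0]) acc
      = acc ++ l.map (fun i => (PySem.List.pyRange i (i + s) 1).foldl
          (fun bd j => bd * 100 + (pvOrdAt t j - 65)) 0) := by
  intro l
  induction l with
  | nil => intro acc; simp
  | cons x xs ih => intro acc; simp [ih]

-- The padded text's length is a multiple of the block width.
theorem pvPad_len (s : Int) (hs : 0 < s) (tl : List Char) :
    ∃ k : Nat, ((pvPad s tl).length : Int) = s * k := by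
  unfold pvPad
  by_cases h : PySem.Int.mod (tl.length : Int) s ≠ 0
  · rw [if_pos h]
    have hr0 : 0 ≤ PySem.Int.mod (tl.length : Int) s := PySem.Int.mod_nonneg _ hs
    have hrs : PySem.Int.mod (tl.length : Int) s < s := PySem.Int.mod_lt _ hs
    have hq : PySem.Int.floordiv (tl.length : Int) s * s + PySem.Int.mod (tl.length : Int) s
        = (tl.length : Int) := PySem.Int.floordiv_mul_add_mod _ _
    have hL0 : (0 : Int) ≤ (tl.length : Int) := Int.natCast_nonneg _
    have hq0 : 0 ≤ PySem.Int.floordiv (tl.length : Int) s := by nlinarith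
    refine ⟨(PySem.Int.floordiv (tl.length : Int) s + 1).toNat, ?_⟩
    have hc1 : (((PySem.Int.floordiv (tl.length : Int) s + 1).toNat : Nat) : Int)
        = PySem.Int.floordiv (tl.length : Int) s + 1 := Int.toNat_of_nonneg (by omega)
    have hc2 : (((s - PySem.Int.mod (tl.length : Int) s).toNat : Nat) : Int)
        = s - PySem.Int.mod (tl.length : Int) s := Int.toNat_of_nonneg (by omega)
    simp only [List.length_append, List.length_replicate]
    push_cast
    rw [hc1, hc2]
    nlinarith
  · rw [if_neg h]
    simp only [ne_eq, not_not] at h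
    obtain ⟨c, hc⟩ := (PySem.Int.mod_eq_zero_iff_dvd _ _).mp h
    have hL0 : (0 : Int) ≤ (tl.length : Int) := Int.natCast_nonneg _
    have hc0 : 0 ≤ c := by nlinarith
    exact ⟨c.toNat, by rw [hc, Int.toNat_of_nonneg hc0]⟩

-- ===== VERDICT (by name: the statement is the Claim_ definition above) =====
theorem makeBlockMessage_spec : Claim_equal_makeBlockMessage := by
  intro lenVal text _ hPre
  unfold Pre_makeBlockMessage at hPre
  unfold Spec_makeBlockMessage
  have hne1 : lenVal ≠ 1 := by
    intro h; apply hPre; rw [h]; decide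
  simp only [makeBlockMessage, makeBlockMessage_alt, if_neg hne1]
  set s := PySem.Int.floordiv lenVal 2 with hsdef
  set t := pvPad s text.toList with htdef
  rcases lt_or_gt_of_ne hPre with hneg | hpos
  · -- s < 0: A's stride range is empty, B's counter never reaches s
    have hA : PySem.List.pyRange 0 ((t.length : Nat) : Int) s = [] := by
      unfold PySem.List.pyRange
      rw [if_neg hPre]
      have h1 : ¬ (0 : Int) < s := by omega
      have h2 : ¬ ((t.length : Nat) : Int) < 0 := not_lt.mpr (Int.natCast_nonneg _)
      simp [h1, h2]
    rw [hA, List.foldl_nil]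
    exact (pvB_neg s hneg t [] 0 0 le_rfl).symm
  · -- 0 < s
    obtain ⟨k, hlenInt⟩ := pvPad_len s hpos text.toList
    rw [← htdef] at hlenInt
    have hsN : (((s.toNat : Nat)) : Int) = s := Int.toNat_of_nonneg hpos.le
    have hlenNat : t.length = s.toNat * k := by
      have h1 : ((s.toNat * k : Nat) : Int) = s * k := by push_cast; rw [hsN]
      exact_mod_cast hlenInt.trans h1.symm
    rw [hlenInt, pvRange_step s hpos k, pvA_fold t s, List.nil_append, List.map_map]
    have hmap : (List.range k).map ((fun (i : Int) => (PySem.List.pyRange i (i + s) 1).foldl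
          (fun bd j => bd * 100 + (pvOrdAt t j - 65)) 0) ∘ (fun (j : Nat) => s * (j : Int)))
        = (List.range k).map (fun j => pvHor 0 ((t.drop (s.toNat * j)).take s.toNat)) := by
      apply List.map_congr_left
      intro j hj
      rw [List.mem_range] at hj
      simp only [Function.comp_apply]
      have hj1 : ((j : Int)) + 1 ≤ (k : Int) := by exact_mod_cast hj
      have hi0 : (0 : Int) ≤ s * (j : Int) := by positivity
      have hend : s * (j : Int) + s ≤ ((t.length : Nat) : Int) := by
        rw [hlenInt]; nlinarith
      rw [pvA_inner s hpos t (s * (j : Int)) hi0 hend]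
      have htn : (s * ((j : Nat) : Int)).toNat = s.toNat * j := by
        calc (s * ((j : Nat) : Int)).toNat
            = ((((s.toNat : Nat)) : Int) * ((j : Nat) : Int)).toNat := by rw [hsN]
          _ = (((s.toNat * j : Nat)) : Int).toNat := by norm_cast
          _ = s.toNat * j := Int.toNat_natCast _
      rw [htn]
    rw [hmap, pvMap_blocks s.toNat k t, pvB_go s hpos k t [] hlenNat]
    simp
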